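-- pv_equiv track=rewrite | github.com/alexchkliar/leetcode-python | 1306. jump_game_iii.py | recursiveCanReach
-- ===== SOURCE A (Python) =====
-- def recursiveCanReach(arr, current_index, solution_trace = []):
--     if (current_index >= len(arr) or current_index < 0 or current_index in solution_trace):
--         return False
--     if arr[current_index] == 0:
--         return True
--     else:
--         return (recursiveCanReach(arr, current_index + arr[current_index], solution_trace + [current_index])
--         or recursiveCanReach(arr, current_index - arr[current_index], solution_trace + [current_index]))
-- ===== SOURCE B (Python) =====
-- def recursiveCanReach(arr, current_index, solution_trace=[]):
--     # Bottom-up boolean fixpoint: good[i] = "a zero is reachable from i avoiding blocked",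
--     # computed by rounds of Jacobi iteration (stopping at the fixpoint) instead of
--     # exponential path-tracing recursion.
--     n = len(arr)
--     blocked = set(solution_trace)
--     good = [False] * n
--     for _ in range(n):
--         new = []
--         for i in range(n):
--             if i in blocked:
--                 new.append(False)
--             elif good[i] or arr[i] == 0:
--                 new.append(True)
--             else:
--                 j1 = i + arr[i]
--                 j2 = i - arr[i]
--                 new.append((0 <= j1 < n and good[j1]) or (0 <= j2 < n and good[j2]))
--         if new == good:
--             break
--         good = new
--     if not (0 <= current_index < n) or current_index in blocked:
--         return False
--     return good[current_index]
-- ===== Notes on version B (the rewrite author's own statement) =====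
-- stated objective: alternative
-- what changed: Replaced the exponential path-tracing recursion by a bottom-up boolean fixpoint (Jacobi rounds computing, for every index, whether a zero is reachable while avoiding the blocked set, stopping when a round changes nothing); worst-case polynomial instead of exponential, but not measurably faster on the benchmark inputs, where A's recursion dies out quickly.
import Mathlib
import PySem

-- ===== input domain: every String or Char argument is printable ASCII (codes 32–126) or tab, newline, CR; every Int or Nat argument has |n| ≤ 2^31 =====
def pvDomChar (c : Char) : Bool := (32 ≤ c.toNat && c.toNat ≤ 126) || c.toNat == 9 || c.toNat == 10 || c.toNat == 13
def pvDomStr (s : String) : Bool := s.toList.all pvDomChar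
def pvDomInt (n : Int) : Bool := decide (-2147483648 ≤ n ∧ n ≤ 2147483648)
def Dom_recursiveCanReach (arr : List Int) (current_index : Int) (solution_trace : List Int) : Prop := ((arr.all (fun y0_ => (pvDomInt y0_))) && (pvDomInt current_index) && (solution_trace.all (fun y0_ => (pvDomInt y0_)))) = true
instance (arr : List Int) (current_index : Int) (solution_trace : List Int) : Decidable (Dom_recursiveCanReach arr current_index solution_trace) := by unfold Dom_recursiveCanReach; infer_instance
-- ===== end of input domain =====

-- B replaces A's exponential path-tracing recursion by a bottom-up boolean fixpoint iteration (alternative algorithm; worst-case polynomial, not measured faster on the benchmark family).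

-- ===== PORT A =====

-- number of in-range indices not yet in the trace: A's termination measure
def freeCount (arr : List Int) (S : List Int) : Nat :=
  ((List.range arr.length).filter (fun (k : Nat) => decide ((k : Int) ∉ S))).length

theorem freeCount_append_lt (arr : List Int) (S : List Int) (i : Int)
    (h0 : 0 ≤ i) (h1 : i < (arr.length : Int)) (h2 : i ∉ S) :
    freeCount arr (S ++ [i]) < freeCount arr S := by
  unfold freeCount
  have hfil : (List.range arr.length).filter (fun (k : Nat) => decide ((k : Int) ∉ S ++ [i])) =
      ((List.range arr.length).filter (fun (k : Nat) => decide ((k : Int) ∉ S))).filter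
        (fun (k : Nat) => decide ((k : Int) ≠ i)) := by
    rw [List.filter_filter]
    apply List.filter_congr
    intro k _
    simp [not_or, Bool.and_comm]
  rw [hfil]
  have hmem : i.toNat ∈ (List.range arr.length).filter (fun (k : Nat) => decide ((k : Int) ∉ S)) := by
    simp only [List.mem_filter, List.mem_range, decide_eq_true_eq]
    refine ⟨by omega, ?_⟩
    rw [Int.toNat_of_nonneg h0]
    exact h2
  have := List.length_filter_lt_length_iff_exists
    (l := (List.range arr.length).filter (fun (k : Nat) => decide ((k : Int) ∉ S)))
    (p := fun (k : Nat) => decide ((k : Int) ≠ i))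
  rw [this]
  exact ⟨i.toNat, hmem, by simp [Int.toNat_of_nonneg h0]⟩

-- literal port of A; arr[current_index] = arr.getD current_index.toNat 0 is exact because the
-- guard has just established 0 ≤ current_index < len(arr)
def recursiveCanReach (arr : List Int) (current_index : Int) (solution_trace : List Int) : Bool :=
  if (arr.length : Int) ≤ current_index ∨ current_index < 0 ∨ current_index ∈ solution_trace then
    false
  else if arr.getD current_index.toNat 0 = 0 then
    true
  else
    recursiveCanReach arr (current_index + arr.getD current_index.toNat 0) (solution_trace ++ [current_index]) ||
    recursiveCanReach arr (current_index - arr.getD current_index.toNat 0) (solution_trace ++ [current_index])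
termination_by freeCount arr solution_trace
decreasing_by
  all_goals
    exact freeCount_append_lt arr solution_trace current_index (by omega) (by omega) (by tauto)

-- ===== PORT B =====

-- one entry of the new row (body of B's inner loop)
def bRow (arr : List Int) (blocked : List Int) (good : List Bool) (i : Nat) : Bool :=
  if (i : Int) ∈ blocked then false
  else if good.getD i false || decide (arr.getD i 0 = 0) then true
  else
    let j1 : Int := (i : Int) + arr.getD i 0
    let j2 : Int := (i : Int) - arr.getD i 0
    (decide (0 ≤ j1 ∧ j1 < (arr.length : Int)) && good.getD j1.toNat false) ||
    (decide (0 ≤ j2 ∧ j2 < (arr.length : Int)) && good.getD j2.toNat false)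

-- one round of B's outer loop (builds the fresh list `new`)
def bStep (arr : List Int) (blocked : List Int) (good : List Bool) : List Bool :=
  (List.range arr.length).map (bRow arr blocked good)

-- one iteration of B's outer loop including the `if new == good: break` early exit:
-- once a round changes nothing the state is a fixpoint, so keeping it is the same value
def bStepB (arr : List Int) (blocked : List Int) (good : List Bool) : List Bool :=
  let new := bStep arr blocked good
  if new == good then good else new

def recursiveCanReach_alt (arr : List Int) (current_index : Int) (solution_trace : List Int) : Bool :=
  let n := arr.length
  let blocked : PySem.Set Int := PySem.Set.ofList solution_trace
  let good := (List.range n).foldl (fun g _ => bStepB arr blocked g) (List.replicate n false)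
  if !decide (0 ≤ current_index ∧ current_index < (n : Int)) || decide (current_index ∈ blocked) then
    false
  else
    good.getD current_index.toNat false

-- ===== PRECONDITION & SPEC =====
def Spec_recursiveCanReach (arr : List Int) (current_index : Int) (solution_trace : List Int) (out : Bool) : Prop := out = recursiveCanReach_alt arr current_index solution_trace
instance (arr : List Int) (current_index : Int) (solution_trace : List Int) (out : Bool) : Decidable (Spec_recursiveCanReach arr current_index solution_trace out) := by unfold Spec_recursiveCanReach; infer_instance

-- ===== CLAIM (what is proved, stated in full; the proofs are below) =====
def Claim_equal_recursiveCanReach : Prop := ∀ (arr : List Int) (current_index : Int) (solution_trace : List Int), Dom_recursiveCanReach arr current_index solution_trace → Spec_recursiveCanReach arr current_index solution_trace (recursiveCanReach arr current_index solution_trace)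

-- ===== LEMMAS AND PROOFS =====

-- "a zero index is reachable from i in at most n steps, avoiding S"
inductive ReachN (arr : List Int) (S : List Int) : Nat → Int → Prop where
  | zero (n : Nat) (i : Int) (h0 : 0 ≤ i) (h1 : i < (arr.length : Int)) (h2 : i ∉ S)
      (hz : arr.getD i.toNat 0 = 0) : ReachN arr S (n + 1) i
  | step (n : Nat) (i c : Int) (h0 : 0 ≤ i) (h1 : i < (arr.length : Int)) (h2 : i ∉ S)
      (hz : arr.getD i.toNat 0 ≠ 0)
      (hc : c = i + arr.getD i.toNat 0 ∨ c = i - arr.getD i.toNat 0)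
      (hr : ReachN arr S n c) : ReachN arr S (n + 1) i

theorem reachN_bounds {arr S : List Int} {n : Nat} {i : Int} (h : ReachN arr S n i) :
    0 ≤ i ∧ i < (arr.length : Int) ∧ i ∉ S := by
  cases h with
  | zero n i h0 h1 h2 hz => exact ⟨h0, h1, h2⟩
  | step n i c h0 h1 h2 hz hc hr => exact ⟨h0, h1, h2⟩

theorem reachN_mono {arr S : List Int} {n m : Nat} {i : Int}
    (h : ReachN arr S n i) (hle : n ≤ m) : ReachN arr S m i := by
  induction h generalizing m with
  | zero n i h0 h1 h2 hz =>
    obtain ⟨m', rfl⟩ : ∃ m', m = m' + 1 := ⟨m - 1, by omega⟩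
    exact .zero m' i h0 h1 h2 hz
  | step n i c h0 h1 h2 hz hc hr ih =>
    obtain ⟨m', rfl⟩ : ∃ m', m = m' + 1 := ⟨m - 1, by omega⟩
    exact .step m' i c h0 h1 h2 hz hc (ih (by omega))

theorem reachN_anti {arr S S' : List Int} {n : Nat} {i : Int}
    (h : ReachN arr S' n i) (hsub : ∀ x, x ∈ S → x ∈ S') : ReachN arr S n i := by
  induction h with
  | zero n i h0 h1 h2 hz => exact .zero n i h0 h1 (fun hm => h2 (hsub _ hm)) hz
  | step n i c h0 h1 h2 hz hc hr ih => exact .step n i c h0 h1 (fun hm => h2 (hsub _ hm)) hz hc ih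

-- path decomposition: a path avoiding S either also avoids y, or passes through y
theorem reachN_split {arr S : List Int} {n : Nat} {c : Int}
    (h : ReachN arr S n c) (y : Int) :
    ReachN arr (S ++ [y]) n c ∨ ∃ m, m ≤ n ∧ ReachN arr S m y := by
  induction h with
  | zero n i h0 h1 h2 hz =>
    by_cases hy : i = y
    · exact Or.inr ⟨n + 1, le_rfl, hy ▸ ReachN.zero n i h0 h1 h2 hz⟩
    · exact Or.inl (.zero n i h0 h1 (by simp [hy, h2]) hz)
  | step n i c h0 h1 h2 hz hc hr ih =>
    by_cases hy : i = y
    · exact Or.inr ⟨n + 1, le_rfl, hy ▸ ReachN.step n i c h0 h1 h2 hz hc hr⟩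
    · rcases ih with hl | ⟨m, hm, hy'⟩
      · exact Or.inl (.step n i c h0 h1 (by simp [hy, h2]) hz hc hl)
      · exact Or.inr ⟨m, by omega, hy'⟩

theorem reachN_free_pos {arr S : List Int} {n : Nat} {i : Int}
    (h : ReachN arr S n i) : 1 ≤ freeCount arr S := by
  obtain ⟨h0, h1, h2⟩ := reachN_bounds h
  have hmem : i.toNat ∈ (List.range arr.length).filter (fun (k : Nat) => decide ((k : Int) ∉ S)) := by
    simp only [List.mem_filter, List.mem_range, decide_eq_true_eq]
    refine ⟨by omega, ?_⟩
    rw [Int.toNat_of_nonneg h0]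
    exact h2
  have := List.length_pos_of_mem hmem
  unfold freeCount
  omega

theorem A_sound (arr : List Int) : ∀ (S : List Int) (i : Int),
    recursiveCanReach arr i S = true → ∃ m, ReachN arr S m i := by
  intro S i
  fun_induction recursiveCanReach arr i S with
  | case1 i S h => simp
  | case2 i S h hz =>
    intro _
    exact ⟨1, .zero 0 i (by omega) (by omega) (by tauto) hz⟩
  | case3 i S h hz ih1 ih2 =>
    intro hor
    rcases Bool.or_eq_true_iff.mp hor with h1 | h1
    · obtain ⟨m, hm⟩ := ih1 h1
      exact ⟨m + 1, .step m i _ (by omega) (by omega) (by tauto) hz (Or.inl rfl)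
        (reachN_anti hm (fun x hx => List.mem_append_left _ hx))⟩
    · obtain ⟨m, hm⟩ := ih2 h1
      exact ⟨m + 1, .step m i _ (by omega) (by omega) (by tauto) hz (Or.inr rfl)
        (reachN_anti hm (fun x hx => List.mem_append_left _ hx))⟩

theorem A_complete (arr : List Int) : ∀ (F : Nat) (S : List Int), freeCount arr S ≤ F →
    ∀ (m : Nat) (i : Int), ReachN arr S m i → recursiveCanReach arr i S = true := by
  intro F
  induction F with
  | zero =>
    intro S hS m i h
    have := reachN_free_pos h
    omega
  | succ F ih =>
    intro S hS m
    induction m using Nat.strong_induction_on with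
    | _ m ihm =>
      intro i h
      cases h with
      | zero n i h0 h1 h2 hz =>
        rw [recursiveCanReach, if_neg (show ¬((arr.length : Int) ≤ i ∨ i < 0 ∨ i ∈ S) by
          push Not; exact ⟨by omega, by omega, h2⟩), if_pos hz]
      | step n i c h0 h1 h2 hz hc hr =>
        rcases reachN_split hr i with hl | ⟨m', hm', hi⟩
        · have hlt := freeCount_append_lt arr S i h0 h1 h2
          have hAc := ih (S ++ [i]) (by omega) n c hl
          rw [recursiveCanReach, if_neg (by push Not; exact ⟨by omega, by omega, h2⟩), if_neg hz]
          rcases hc with rfl | rfl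
          · exact Bool.or_eq_true_iff.mpr (Or.inl hAc)
          · exact Bool.or_eq_true_iff.mpr (Or.inr hAc)
        · exact ihm m' (by omega) i hi

-- shortening: any reachability witness can be bounded by the number of free indices
theorem reachN_shorten (arr : List Int) : ∀ (F : Nat) (S : List Int), freeCount arr S ≤ F →
    ∀ (m : Nat) (i : Int), ReachN arr S m i → ReachN arr S (freeCount arr S) i := by
  intro F
  induction F with
  | zero =>
    intro S hS m i h
    have := reachN_free_pos h
    omega
  | succ F ih =>
    intro S hS m
    induction m using Nat.strong_induction_on with
    | _ m ihm =>
      intro i h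
      cases h with
      | zero n i h0 h1 h2 hz =>
        have hf := reachN_free_pos (ReachN.zero (arr := arr) n i h0 h1 h2 hz)
        obtain ⟨f, hf'⟩ : ∃ f, freeCount arr S = f + 1 := ⟨freeCount arr S - 1, by omega⟩
        rw [hf']
        exact .zero f i h0 h1 h2 hz
      | step n i c h0 h1 h2 hz hc hr =>
        rcases reachN_split hr i with hl | ⟨m', hm', hi⟩
        · have hlt := freeCount_append_lt arr S i h0 h1 h2
          have h2' := ih (S ++ [i]) (by omega) n c hl
          have h3 := reachN_anti h2' (fun x hx => List.mem_append_left _ hx)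
          have h4 : ReachN arr S (freeCount arr (S ++ [i]) + 1) i :=
            .step _ i c h0 h1 h2 hz hc h3
          exact reachN_mono h4 (by omega)
        · exact ihm m' (by omega) i hi

theorem bIter_char (arr S blocked : List Int)
    (hmem : ∀ x : Int, x ∈ blocked ↔ x ∈ S) :
    ∀ (k : Nat) (i : Nat), i < arr.length →
      (((bStep arr blocked)^[k] (List.replicate arr.length false)).getD i false = true ↔
        ReachN arr S k (i : Int)) := by
  intro k
  induction k with
  | zero =>
    intro i hi
    simp only [Function.iterate_zero, id_eq]
    rw [List.getD_eq_getElem?_getD, List.getElem?_replicate]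
    simp only [hi, if_pos, Option.getD_some]
    constructor
    · intro h; cases h
    · intro h; cases h
  | succ k ih =>
    intro i hi
    rw [Function.iterate_succ_apply']
    have hrow : ((bStep arr blocked) ((bStep arr blocked)^[k] (List.replicate arr.length false))).getD i false
        = bRow arr blocked ((bStep arr blocked)^[k] (List.replicate arr.length false)) i := by
      unfold bStep
      rw [List.getD_eq_getElem?_getD, List.getElem?_map, List.getElem?_range hi]
      rfl
    rw [hrow]
    set g := (bStep arr blocked)^[k] (List.replicate arr.length false) with hg
    simp only [bRow]
    have hcast : ((i : Int)).toNat = i := Int.toNat_natCast i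
    by_cases hb : (i : Int) ∈ blocked
    · rw [if_pos hb]
      constructor
      · intro h; cases h
      · intro h; exact absurd ((hmem _).mp hb) (reachN_bounds h).2.2
    · rw [if_neg hb]
      have hiS : (i : Int) ∉ S := fun hx => hb ((hmem _).mpr hx)
      by_cases hgz : g.getD i false = true ∨ arr.getD i 0 = 0
      · have hcond : (g.getD i false || decide (arr.getD i 0 = 0)) = true := by
          rcases hgz with h | h
          · exact Bool.or_eq_true_iff.mpr (Or.inl h)
          · exact Bool.or_eq_true_iff.mpr (Or.inr (decide_eq_true h))
        rw [if_pos hcond]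
        constructor
        · intro _
          rcases hgz with h | h
          · exact reachN_mono ((ih i hi).mp h) (by omega)
          · exact .zero k i (by omega) (by exact_mod_cast hi) hiS (by rw [hcast]; exact h)
        · intro _; rfl
      · push Not at hgz
        obtain ⟨hgk, ha⟩ := hgz
        have hcond2 : ¬((g.getD i false || decide (arr.getD i 0 = 0)) = true) := by
          intro hx
          rcases Bool.or_eq_true_iff.mp hx with hx' | hx'
          · exact hgk hx'
          · exact ha (of_decide_eq_true hx')
        rw [if_neg hcond2]
        constructor
        · intro h
          rcases Bool.or_eq_true_iff.mp h with h1 | h1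
          · obtain ⟨hj, hgood⟩ := Bool.and_eq_true_iff.mp h1
            have hj' := of_decide_eq_true hj
            have hjlt : ((i : Int) + arr.getD i 0).toNat < arr.length := by omega
            have hr := (ih _ hjlt).mp hgood
            have hc2 : ((((i : Int) + arr.getD i 0).toNat : Int)) = (i : Int) + arr.getD i 0 :=
              Int.toNat_of_nonneg hj'.1
            rw [hc2] at hr
            exact .step k (i : Int) _ (by omega) (by exact_mod_cast hi) hiS
              (by rw [hcast]; exact ha) (Or.inl (by rw [hcast])) hr
          · obtain ⟨hj, hgood⟩ := Bool.and_eq_true_iff.mp h1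
            have hj' := of_decide_eq_true hj
            have hjlt : ((i : Int) - arr.getD i 0).toNat < arr.length := by omega
            have hr := (ih _ hjlt).mp hgood
            have hc2 : ((((i : Int) - arr.getD i 0).toNat : Int)) = (i : Int) - arr.getD i 0 :=
              Int.toNat_of_nonneg hj'.1
            rw [hc2] at hr
            exact .step k (i : Int) _ (by omega) (by exact_mod_cast hi) hiS
              (by rw [hcast]; exact ha) (Or.inr (by rw [hcast])) hr
        · intro h
          cases h with
          | zero _ _ h0 h1 h2 hz => rw [hcast] at hz; exact absurd hz ha
          | step _ _ c h0 h1 h2 hz hc hr =>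
            have hbnd := reachN_bounds hr
            have hclt : c.toNat < arr.length := by omega
            have hc3 : ((c.toNat : Int)) = c := Int.toNat_of_nonneg hbnd.1
            have hgc : g.getD c.toNat false = true := (ih c.toNat hclt).mpr (by rw [hc3]; exact hr)
            rw [hcast] at hc
            rcases hc with rfl | rfl
            · exact Bool.or_eq_true_iff.mpr (Or.inl (Bool.and_eq_true_iff.mpr
                ⟨decide_eq_true ⟨hbnd.1, hbnd.2.1⟩, hgc⟩))
            · exact Bool.or_eq_true_iff.mpr (Or.inr (Bool.and_eq_true_iff.mpr
                ⟨decide_eq_true ⟨hbnd.1, hbnd.2.1⟩, hgc⟩))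

theorem foldl_range_const {α : Type} (f : α → α) (init : α) (k : Nat) :
    (List.range k).foldl (fun g _ => f g) init = f^[k] init := by
  induction k with
  | zero => rfl
  | succ k ih => rw [List.range_succ, List.foldl_append, ih, Function.iterate_succ_apply']; rfl

-- ===== VERDICT (by name: the statement is the Claim_ definition above) =====
theorem freeCount_le (arr S : List Int) : freeCount arr S ≤ arr.length := by
  unfold freeCount
  have := List.length_filter_le (fun (k : Nat) => decide ((k : Int) ∉ S)) (List.range arr.length)
  simpa using this

theorem bStepB_eq (arr blocked : List Int) : bStepB arr blocked = bStep arr blocked := by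
  funext g
  simp only [bStepB]
  split
  · next h => exact (eq_of_beq h).symm
  · rfl

theorem recursiveCanReach_spec : Claim_equal_recursiveCanReach := by
  intro arr ci S _
  unfold Spec_recursiveCanReach
  simp only [recursiveCanReach_alt]
  rw [foldl_range_const, bStepB_eq]
  have hmem : ∀ x : Int, x ∈ PySem.Set.ofList S ↔ x ∈ S := fun x => PySem.Set.mem_ofList S x
  by_cases hval : (0 ≤ ci ∧ ci < (arr.length : Int)) ∧ ci ∉ S
  · obtain ⟨⟨h0, h1⟩, h2⟩ := hval
    have hc1 : decide (0 ≤ ci ∧ ci < (arr.length : Int)) = true := decide_eq_true ⟨h0, h1⟩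
    have hc2 : decide (ci ∈ PySem.Set.ofList S) = false :=
      decide_eq_false (fun hx => h2 ((hmem _).mp hx))
    rw [hc1, hc2]
    simp only [Bool.not_true, Bool.or_false, if_false, Bool.false_eq_true]
    have hlt : ci.toNat < arr.length := by omega
    have hcast : ((ci.toNat : Int)) = ci := Int.toNat_of_nonneg h0
    have hchar := bIter_char arr S (PySem.Set.ofList S) hmem arr.length ci.toNat hlt
    rw [hcast] at hchar
    rw [Bool.eq_iff_iff, hchar]
    constructor
    · intro hA
      obtain ⟨m, hm⟩ := A_sound arr S ci hA
      have hsh := reachN_shorten arr (freeCount arr S) S le_rfl m ci hm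
      exact reachN_mono hsh (freeCount_le arr S)
    · intro hR
      exact A_complete arr (freeCount arr S) S le_rfl arr.length ci hR
  · have hguard : (arr.length : Int) ≤ ci ∨ ci < 0 ∨ ci ∈ S := by
      by_cases hin : ci ∈ S
      · exact Or.inr (Or.inr hin)
      · have hnv : ¬(0 ≤ ci ∧ ci < (arr.length : Int)) := fun hx => hval ⟨hx, hin⟩
        omega
    rw [recursiveCanReach, if_pos hguard]
    have hcond : (!decide (0 ≤ ci ∧ ci < (arr.length : Int)) || decide (ci ∈ PySem.Set.ofList S)) = true := by
      by_cases hin : ci ∈ S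
      · rw [decide_eq_true ((hmem _).mpr hin)]
        simp
      · have : decide (0 ≤ ci ∧ ci < (arr.length : Int)) = false := by
          apply decide_eq_false
          intro hx
          rcases hguard with h | h | h
          · omega
          · omega
          · exact hin h
        rw [this]
        simp
    rw [if_pos hcond]
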